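-- pv_equiv track=rewrite | github.com/Mikejkee/xmlparser_elastic_postgres | utils/additional_utils.py | fill_category_levels
-- ===== SOURCE A (Python) =====
-- def fill_category_levels(category_id: str, category_map: dict) -> dict:
--     """
--     Заполняет поля category_lvl_1, category_lvl_2, category_lvl_3 и category_remaining.
--
--     :param category_id: ID категории.
--     :param category_map: Словарь с категориями.
--     :return: Словарь с заполненными уровнями.
--     """
--     result = {f'category_lvl_{i}': None for i in range(1, 4)}
--     result['category_remaining'] = None
--
--     current_id = category_id
--     level = 4
--
--     while current_id and 4 >= level > 0:
--         if current_id in category_map: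
--             if level <= 3:
--                 result[f'category_lvl_{level}'] = category_map[current_id]['name']
--             else:
--                 result['category_remaining'] = category_map[current_id]['name']
--             current_id = category_map[current_id]['parentId']
--             level -= 1
--         else:
--             break
--
--     return result
-- ===== SOURCE B (Python) =====
-- def fill_category_levels(category_id: str, category_map: dict) -> dict:
--     # Each output field is an independent closed-form expression: the name of the
--     # k-th ancestor of category_id (k = 3,2,1,0), found by re-walking the parent
--     # chain from scratch; no mutable result dict, no level counter, no shared loop.
--     def ancestor(k):
--         c = category_id
--         for _ in range(k):
--             if not (c and c in category_map):
--                 return None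
--             c = category_map[c]['parentId']
--         return c if (c and c in category_map) else None
--
--     def name_at(k):
--         a = ancestor(k)
--         return category_map[a]['name'] if a is not None else None
--
--     return {'category_lvl_1': name_at(3),
--             'category_lvl_2': name_at(2),
--             'category_lvl_3': name_at(1),
--             'category_remaining': name_at(0)}
-- ===== Notes on version B (the rewrite author's own statement) =====
-- stated objective: alternative
-- what changed: B has no result-dict mutation and no shared walking loop: each of the four output fields is an independent closed-form expression 'name of the k-th ancestor of category_id' (k=3,2,1,0), each computed by re-walking the parent chain from the start; it trades A's single stateful O(1) walk for four independent bounded re-walks of the same constant total cost.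
import Mathlib
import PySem

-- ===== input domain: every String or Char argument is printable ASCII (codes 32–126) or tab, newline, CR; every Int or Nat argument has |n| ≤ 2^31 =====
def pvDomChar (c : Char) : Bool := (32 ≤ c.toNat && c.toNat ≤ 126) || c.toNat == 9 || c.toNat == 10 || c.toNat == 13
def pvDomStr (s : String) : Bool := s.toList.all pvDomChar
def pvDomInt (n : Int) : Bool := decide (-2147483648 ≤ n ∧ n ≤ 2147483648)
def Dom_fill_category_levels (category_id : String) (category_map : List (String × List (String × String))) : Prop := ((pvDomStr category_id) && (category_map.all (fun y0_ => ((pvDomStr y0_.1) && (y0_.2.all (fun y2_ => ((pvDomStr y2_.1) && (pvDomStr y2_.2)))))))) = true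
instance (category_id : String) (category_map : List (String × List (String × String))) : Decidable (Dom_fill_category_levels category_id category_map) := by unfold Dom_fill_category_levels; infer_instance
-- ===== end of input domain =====

-- B computes each of the four output fields as an independent "name of the k-th ancestor"
-- expression (re-walking the chain per field) instead of A's single mutating level-counting
-- loop; objective: alternative (same constant cost, no shared state).

-- ===== PORT A =====
-- result = {'category_lvl_1': None, ..., 'category_remaining': None}
def pvInitResultA : PySem.Dict String (Option String) :=
  ((((PySem.Dict.empty).insert "category_lvl_1" none).insert "category_lvl_2" none).insert
      "category_lvl_3" none).insert "category_remaining" none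

-- the while loop of A; the Nat fuel IS Python's `level` counter (4 ≥ level > 0).
-- `.getD ""` on 'name'/'parentId' is never taken under Pre_ (Python raises KeyError there).
def pvFillLoopA (m : List (String × List (String × String))) :
    Nat → String → PySem.Dict String (Option String) → PySem.Dict String (Option String)
  | 0, _, r => r
  | lvl+1, c, r =>
    if c = "" then r
    else
      match (PySem.Dict.mk m).get? c with
      | none => r
      | some d =>
        let name := ((PySem.Dict.mk d).get? "name").getD ""
        let r' :=
          if lvl + 1 ≤ 3 then
            r.insert ("category_lvl_" ++ PySem.Int.toStr ((lvl : Int) + 1)) (some name)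
          else r.insert "category_remaining" (some name)
        pvFillLoopA m lvl (((PySem.Dict.mk d).get? "parentId").getD "") r'

def fill_category_levels (category_id : String) (category_map : List (String × List (String × String))) : List (String × Option String) :=
  (pvFillLoopA category_map 4 category_id pvInitResultA).items

-- ===== PORT B =====
-- ancestor(k): walk k parent steps from category_id; None if the chain breaks or ends invalid
def pvAnc (m : List (String × List (String × String))) : Nat → String → Option String
  | 0, c => if c ≠ "" ∧ ((PySem.Dict.mk m).get? c).isSome then some c else none
  | k+1, c =>
    if c = "" then none
    else
      match (PySem.Dict.mk m).get? c with
      | none => none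
      | some d => pvAnc m k (((PySem.Dict.mk d).get? "parentId").getD "")

-- category_map[a]['name'] (a is always a present key when pvAnc returns it)
def pvNameOf (m : List (String × List (String × String))) (a : String) : String :=
  match (PySem.Dict.mk m).get? a with
  | some d => ((PySem.Dict.mk d).get? "name").getD ""
  | none => ""

-- name_at(k)
def pvNameAt (m : List (String × List (String × String))) (cid : String) (k : Nat) : Option String :=
  (pvAnc m k cid).map (pvNameOf m)

def fill_category_levels_alt (category_id : String) (category_map : List (String × List (String × String))) : List (String × Option String) :=
  [("category_lvl_1", pvNameAt category_map category_id 3),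
   ("category_lvl_2", pvNameAt category_map category_id 2),
   ("category_lvl_3", pvNameAt category_map category_id 1),
   ("category_remaining", pvNameAt category_map category_id 0)]

-- ===== PRECONDITION & SPEC =====
-- one chain step: "" from "" or when the id is absent / its record has no 'parentId'
def pvNextId (m : List (String × List (String × String))) (c : String) : String :=
  if c = "" then ""
  else
    match (PySem.Dict.mk m).get? c with
    | none => ""
    | some d => ((PySem.Dict.mk d).get? "parentId").getD ""

-- a visited id is fine when it is falsy, absent, or its record has both 'name' and 'parentId'
def pvChkId (m : List (String × List (String × String))) (c : String) : Bool :=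
  c == "" ||
    (match (PySem.Dict.mk m).get? c with
     | none => true
     | some d =>
       ((PySem.Dict.mk d).get? "name").isSome && ((PySem.Dict.mk d).get? "parentId").isSome)

-- Pre_ excludes exactly the inputs where Python A raises KeyError: some record visited on
-- the (at most four-step) parent chain lacks the 'name' or 'parentId' key.
def Pre_fill_category_levels (category_id : String) (category_map : List (String × List (String × String))) : Prop :=
  (pvChkId category_map category_id &&
   pvChkId category_map (pvNextId category_map category_id) &&
   pvChkId category_map (pvNextId category_map (pvNextId category_map category_id)) &&
   pvChkId category_map
     (pvNextId category_map (pvNextId category_map (pvNextId category_map category_id)))) = true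

instance (category_id : String) (category_map : List (String × List (String × String))) : Decidable (Pre_fill_category_levels category_id category_map) := by unfold Pre_fill_category_levels; infer_instance

def pvWitness_fill_category_levels : String × (List (String × List (String × String))) :=
  ("c1", [("c1", [("name", "Phones"), ("parentId", "c2")]),
          ("c2", [("name", "Electronics"), ("parentId", "")])])

def Spec_fill_category_levels (category_id : String) (category_map : List (String × List (String × String))) (out : List (String × Option String)) : Prop := out = fill_category_levels_alt category_id category_map
instance (category_id : String) (category_map : List (String × List (String × String))) (out : List (String × Option String)) : Decidable (Spec_fill_category_levels category_id category_map out) := by unfold Spec_fill_category_levels; infer_instance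

-- ===== CLAIM (what is proved, stated in full; the proofs are below) =====
def Claim_equal_fill_category_levels : Prop := ∀ (category_id : String) (category_map : List (String × List (String × String))), Dom_fill_category_levels category_id category_map → Pre_fill_category_levels category_id category_map → Spec_fill_category_levels category_id category_map (fill_category_levels category_id category_map)

-- ===== LEMMAS AND PROOFS =====

-- the chain of names A's loop consumes (used only in the proof, as the common description)
def pvCollect (m : List (String × List (String × String))) : Nat → String → List String
  | 0, _ => []
  | f+1, c =>
    if c = "" then []
    else
      match (PySem.Dict.mk m).get? c with
      | none => []
      | some d =>
        (((PySem.Dict.mk d).get? "name").getD "") ::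
          pvCollect m f (((PySem.Dict.mk d).get? "parentId").getD "")

def pvKeyOrder : List String :=
  ["category_remaining", "category_lvl_3", "category_lvl_2", "category_lvl_1"]

-- A's loop at level fuel n equals "zip the remaining keys with the collected names" folded in.
lemma pvLoop_eq_fold (m : List (String × List (String × String))) :
    ∀ (n : Nat), n ≤ 4 → ∀ (c : String) (r : PySem.Dict String (Option String)),
      pvFillLoopA m n c r =
        ((pvKeyOrder.drop (4 - n)).zip (pvCollect m n c)).foldl
          (fun r kv => r.insert kv.1 (some kv.2)) r := by
  intro n
  induction n with
  | zero => intro _ c r; simp [pvFillLoopA, pvCollect]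
  | succ k ih =>
    intro hk c r
    have hk' : k ≤ 4 := by omega
    have hk3 : k ≤ 3 := by omega
    by_cases hc : c = ""
    · simp [pvFillLoopA, pvCollect, hc]
    · cases hm : (PySem.Dict.mk m).get? c with
      | none => simp [pvFillLoopA, pvCollect, hc, hm]
      | some d =>
        have hkey : pvKeyOrder.drop (4 - (k + 1)) =
            (if k + 1 ≤ 3 then "category_lvl_" ++ PySem.Int.toStr ((k : Int) + 1)
             else "category_remaining") :: pvKeyOrder.drop (4 - k) := by
          clear hk hk' ih; interval_cases k <;> decide
        simp only [pvFillLoopA, pvCollect, hc, hm]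
        rw [hkey]
        simp only [if_neg not_false, List.zip_cons_cons, List.foldl_cons]
        by_cases h3 : k + 1 ≤ 3 <;> simp only [h3, if_true, if_false] <;> exact ih hk' _ _

-- B's per-field ancestor walk reads off exactly the i-th collected name
lemma pvAnc_collect (m : List (String × List (String × String))) :
    ∀ (i f : Nat) (c : String), i < f →
      (pvCollect m f c)[i]? = (pvAnc m i c |>.map (pvNameOf m)) := by
  intro i
  induction i with
  | zero =>
    intro f c hf
    cases f with
    | zero => omega
    | succ f' =>
      by_cases hc : c = ""
      · simp [pvCollect, pvAnc, hc]
      · cases hm : (PySem.Dict.mk m).get? c with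
        | none => simp [pvCollect, pvAnc, hc, hm]
        | some d => simp [pvCollect, pvAnc, hc, hm, pvNameOf]
  | succ i ih =>
    intro f c hf
    cases f with
    | zero => omega
    | succ f' =>
      by_cases hc : c = ""
      · simp [pvCollect, pvAnc, hc]
      · cases hm : (PySem.Dict.mk m).get? c with
        | none => simp [pvCollect, pvAnc, hc, hm]
        | some d =>
          simp only [pvCollect, pvAnc, hc, hm]
          simp only [if_false, List.getElem?_cons_succ]
          exact ih f' _ (by omega)

lemma pvCollect_len (m : List (String × List (String × String))) :
    ∀ (f : Nat) (c : String), (pvCollect m f c).length ≤ f := by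
  intro f
  induction f with
  | zero => intro c; simp [pvCollect]
  | succ k ih =>
    intro c
    by_cases hc : c = ""
    · simp [pvCollect, hc]
    · cases hm : (PySem.Dict.mk m).get? c with
      | none => simp [pvCollect, hc, hm]
      | some d => simpa [pvCollect, hc, hm] using ih _

-- ===== VERDICT (by name: the statement is the Claim_ definition above) =====
theorem fill_category_levels_spec : Claim_equal_fill_category_levels := by
  intro cid m _ _
  unfold Spec_fill_category_levels fill_category_levels fill_category_levels_alt
  rw [pvLoop_eq_fold m 4 (by omega) cid]
  have h0 : pvNameAt m cid 0 = (pvCollect m 4 cid)[0]? := (pvAnc_collect m 0 4 cid (by omega)).symm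
  have h1 : pvNameAt m cid 1 = (pvCollect m 4 cid)[1]? := (pvAnc_collect m 1 4 cid (by omega)).symm
  have h2 : pvNameAt m cid 2 = (pvCollect m 4 cid)[2]? := (pvAnc_collect m 2 4 cid (by omega)).symm
  have h3 : pvNameAt m cid 3 = (pvCollect m 4 cid)[3]? := (pvAnc_collect m 3 4 cid (by omega)).symm
  have hlen := pvCollect_len m 4 cid
  rcases hns : pvCollect m 4 cid with _ | ⟨a, _ | ⟨b, _ | ⟨c3, _ | ⟨d4, _ | ⟨e5, tl⟩⟩⟩⟩⟩ <;>
    rw [hns] at h0 h1 h2 h3 hlen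
  · simp only [List.getElem?_nil] at h0 h1 h2 h3
    simp [h0, h1, h2, h3, pvKeyOrder, pvInitResultA]
    rfl
  · simp only [List.getElem?_cons_zero, List.getElem?_cons_succ] at h0 h1 h2 h3
    simp [h0, h1, h2, h3, pvKeyOrder, pvInitResultA]
    rfl
  · simp only [List.getElem?_cons_zero, List.getElem?_cons_succ] at h0 h1 h2 h3
    simp [h0, h1, h2, h3, pvKeyOrder, pvInitResultA]
    rfl
  · simp only [List.getElem?_cons_zero, List.getElem?_cons_succ] at h0 h1 h2 h3
    simp [h0, h1, h2, h3, pvKeyOrder, pvInitResultA]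
    rfl
  · simp only [List.getElem?_cons_zero, List.getElem?_cons_succ] at h0 h1 h2 h3
    simp [h0, h1, h2, h3, pvKeyOrder, pvInitResultA]
    rfl
  · simp at hlen
    omega
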